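-- pv_equiv track=rewrite | github.com/jhiltonsantos/ADS-Algoritmos-IFPI | AtividadeURI_4_Repeticoes_String_Relacionados/uri_1287_processador_amigavel_de_inteiros.py | transforma
-- ===== SOURCE A (Python) =====
-- def transforma(valor):
--     valor_processado = ''
--
--     for i in range(len(valor)):
--         if (valor[i]=='O') or (valor[i]=='o'):
--             valor_processado += '0'
--         elif (valor[i]=='l'):
--             valor_processado += '1'
--         elif (valor[i]==' ') or (valor[i]==','):
--             valor_processado += ''
--         else:
--             valor_processado += valor[i]
--
--     return valor_processado
-- ===== SOURCE B (Python) =====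
-- def transforma(valor):
--     return (valor.replace('O', '0')
--                  .replace('o', '0')
--                  .replace('l', '1')
--                  .replace(' ', '')
--                  .replace(',', ''))
-- ===== Notes on version B (the rewrite author's own statement) =====
-- stated objective: idiomatic
-- what changed: Replaces A's single index loop with per-character branching and repeated string concatenation by a chain of whole-string str.replace passes, one per substitution/removal (safe since the categories are disjoint and no produced character is a later key).
import Mathlib
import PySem

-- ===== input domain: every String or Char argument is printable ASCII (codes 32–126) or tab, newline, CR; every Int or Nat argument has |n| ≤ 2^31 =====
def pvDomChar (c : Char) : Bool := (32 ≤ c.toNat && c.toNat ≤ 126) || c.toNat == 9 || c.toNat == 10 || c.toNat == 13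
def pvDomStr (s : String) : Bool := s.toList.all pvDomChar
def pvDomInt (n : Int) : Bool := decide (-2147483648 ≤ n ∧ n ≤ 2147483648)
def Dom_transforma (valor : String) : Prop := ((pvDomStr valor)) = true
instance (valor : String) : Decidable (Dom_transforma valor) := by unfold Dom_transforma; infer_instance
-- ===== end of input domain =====

-- B replaces A's one index loop with per-char branches by a chain of whole-string replace passes (idiomatic).

-- ===== PORT A =====
-- for i in range(len(valor)): branch on valor[i], append to the accumulator string
def transforma (valor : String) : String :=
  String.ofList <|
    (PySem.List.pyRange 0 (valor.toList.length) 1).foldl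
      (fun acc i =>
        if PySem.List.pyGetD valor.toList i ' ' = 'O' ∨ PySem.List.pyGetD valor.toList i ' ' = 'o' then acc ++ ['0']
        else if PySem.List.pyGetD valor.toList i ' ' = 'l' then acc ++ ['1']
        else if PySem.List.pyGetD valor.toList i ' ' = ' ' ∨ PySem.List.pyGetD valor.toList i ' ' = ',' then acc ++ ([] : List Char)
        else acc ++ [PySem.List.pyGetD valor.toList i ' '])
      ([] : List Char)

-- ===== PORT B =====
def transforma_alt (valor : String) : String :=
  PySem.Str.replace
    (PySem.Str.replace
      (PySem.Str.replace
        (PySem.Str.replace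
          (PySem.Str.replace valor "O" "0")
          "o" "0")
        "l" "1")
      " " "")
    "," ""

-- ===== PRECONDITION & SPEC =====
def Spec_transforma (valor : String) (out : String) : Prop := out = transforma_alt valor
instance (valor : String) (out : String) : Decidable (Spec_transforma valor out) := by unfold Spec_transforma; infer_instance

-- ===== CLAIM (what is proved, stated in full; the proofs are below) =====
def Claim_equal_transforma : Prop := ∀ (valor : String), Dom_transforma valor → Spec_transforma valor (transforma valor)

-- ===== LEMMAS AND PROOFS =====

/-- Single-character `replace` is a flatMap of a pointwise substitution. -/
theorem replace_single_go (o : Char) (new : List Char) :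
    ∀ (l : List Char) (fuel : Nat) (acc : List Char), l.length ≤ fuel →
      PySem.Chars.replace.go [o] new fuel l acc
        = acc.reverse ++ l.flatMap (fun c => if c = o then new else [c]) := by
  intro l
  induction l with
  | nil =>
    intro fuel acc _
    cases fuel <;> simp [PySem.Chars.replace.go]
  | cons c t ih =>
    intro fuel acc h
    cases fuel with
    | zero => simp at h
    | succ f =>
      simp only [PySem.Chars.replace.go]
      by_cases hc : c = o
      · have hp : List.isPrefixOf [o] (c :: t) = true := by
          simp [List.isPrefixOf, hc]
        rw [if_pos hp]
        have := ih f (new.reverse ++ acc) (by simpa using Nat.lt_succ_iff.mp (by simpa using h))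
        simp only [List.length_cons, List.length_nil, List.drop_succ_cons, List.drop_zero] at this ⊢
        rw [this]
        simp [List.flatMap_cons, hc]
      · have hp : List.isPrefixOf [o] (c :: t) = false := by
          simp [List.isPrefixOf]
          exact fun h' => hc h'.symm
        simp only [hp]
        have := ih f (c :: acc) (by simpa using Nat.lt_succ_iff.mp (by simpa using h))
        rw [if_neg (by simp), this]
        simp [List.flatMap_cons, hc]

theorem replace_single (o : Char) (new s : List Char) :
    PySem.Chars.replace s [o] new = s.flatMap (fun c => if c = o then new else [c]) := by
  simp only [PySem.Chars.replace, List.isEmpty_cons, Bool.false_eq_true, if_false]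
  simpa using replace_single_go o new s s.length [] le_rfl

/-- A's loop body expressed as a flatMap over the characters. -/
def subst (c : Char) : List Char :=
  if c = 'O' ∨ c = 'o' then ['0']
  else if c = 'l' then ['1']
  else if c = ' ' ∨ c = ',' then []
  else [c]

theorem transforma_eq_flatMap (valor : String) :
    transforma valor = String.ofList (valor.toList.flatMap subst) := by
  unfold transforma
  rw [show (valor.toList.length : Int) = PySem.List.len valor.toList from rfl]
  rw [PySem.List.foldl_pyRange_zero_pyGetD valor.toList ' '
        (fun acc c =>
          if c = 'O' ∨ c = 'o' then acc ++ ['0']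
          else if c = 'l' then acc ++ ['1']
          else if c = ' ' ∨ c = ',' then acc ++ ([] : List Char)
          else acc ++ [c])
        ([] : List Char)]
  have hbody : (fun (acc : List Char) (c : Char) =>
        if c = 'O' ∨ c = 'o' then acc ++ ['0']
        else if c = 'l' then acc ++ ['1']
        else if c = ' ' ∨ c = ',' then acc ++ ([] : List Char)
        else acc ++ [c]) = fun acc c => acc ++ subst c := by
    funext acc c
    simp only [subst]
    split_ifs <;> rfl
  rw [hbody, PySem.List.foldl_append_eq_flatMap]
  simp

theorem flatMap_flatMap_subst (f g : Char → List Char) (s : List Char) :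
    (s.flatMap f).flatMap g = s.flatMap (fun c => (f c).flatMap g) := by
  simp [List.flatMap_assoc]

theorem transforma_alt_eq_flatMap (valor : String) :
    transforma_alt valor = String.ofList (valor.toList.flatMap subst) := by
  unfold transforma_alt
  simp only [PySem.Str.replace, String.toList_ofList]
  rw [show ("O".toList) = ['O'] from rfl, show ("o".toList) = ['o'] from rfl,
      show ("l".toList) = ['l'] from rfl, show (" ".toList) = [' '] from rfl,
      show (",".toList) = [','] from rfl, show ("0".toList) = ['0'] from rfl,
      show ("1".toList) = ['1'] from rfl, show ("".toList) = ([] : List Char) from rfl]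
  rw [replace_single, replace_single, replace_single, replace_single, replace_single]
  rw [flatMap_flatMap_subst, flatMap_flatMap_subst, flatMap_flatMap_subst, flatMap_flatMap_subst]
  congr 1
  apply List.flatMap_congr
  intro c _
  by_cases h1 : c = 'O' <;> by_cases h2 : c = 'o' <;> by_cases h3 : c = 'l' <;>
    by_cases h4 : c = ' ' <;> by_cases h5 : c = ',' <;>
    simp_all [subst]

-- ===== VERDICT (by name: the statement is the Claim_ definition above) =====
theorem transforma_spec : Claim_equal_transforma := by
  intro valor _
  unfold Spec_transforma
  rw [transforma_eq_flatMap, transforma_alt_eq_flatMap]
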